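-- pv_equiv track=rewrite | github.com/rdenise/refseq_viral_taxonomy_metadata | create_metadata_refseq.py | get_level_lineage
-- ===== SOURCE A (Python) =====
-- def get_level_lineage(name: str) -> str:
--     """Get level lineage from name .
--
--     Args:
--         name (str): The name of the level you want to know the lineage
--
--     Returns:
--         str: the level of the lineage
--     """
--
--     level_key = {
--         "root": ["Viruses"],
--         "realm": ["viria", "satellitia", "viroidia", "viriformia"],
--         "subrealm": ["vira", "satellita", "viroida", "viriforma"],
--         "kingdom": ["virae", "satellitae", "viroidae", "viriformae"],
--         "subkingdom": ["virites", "satellitites", "viroidites", "viriformites"],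
--         "phylum": ["viricota", "satelliticota", "viroidicota", "viriformicota"],
--         "subphylum": [
--             "viricotina",
--             "satelliticotina",
--             "viroidicotina",
--             "viriformicotina",
--         ],
--         "class": ["viricetes", "satelliticetes", "viroidicetes", "viriformicetes"],
--         "subclass": [
--             "viricetidae",
--             "satelliticetidae",
--             "viroidicetidae",
--             "viriformicetidae",
--         ],
--         "order": ["virales", "satellitales", "viroidales", "viriformales"],
--         "suborder": ["virineae", "satellitineae", "viroidineae", "viriformineae"],
--         "family": ["viridae", "viriformidae", "viroidae", "satellitidae"],
--         "subfamily": ["virinae", "satellitinae", "viroidinae", "viriforminae"],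
--         "genus": ["virus", "viriform", "viroid", "satellite"],
--     }
--
--     for level, exts in level_key.items():
--         for ext in exts:
--             if name.endswith(ext):
--                 return level
--     return None
-- ===== SOURCE B (Python) =====
-- # Grammar-based re-implementation: every suffix in the table (apart from the
-- # literals "Viruses" and the genus forms) is a stem + rank-specific ending,
-- # so we test one ending per rank and then one stem against the remaining prefix.
--
-- _STEMS = ["vir", "satellit", "viroid", "viriform"]
--
-- # (rank, ending, admissible stems); "family" lacks the regular viroid form
-- # ("viroidae" in A's family row is the kingdom form and is caught by kingdom).
-- _RANKS = [
--     ("realm", "ia", _STEMS),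
--     ("subrealm", "a", _STEMS),
--     ("kingdom", "ae", _STEMS),
--     ("subkingdom", "ites", _STEMS),
--     ("phylum", "icota", _STEMS),
--     ("subphylum", "icotina", _STEMS),
--     ("class", "icetes", _STEMS),
--     ("subclass", "icetidae", _STEMS),
--     ("order", "ales", _STEMS),
--     ("suborder", "ineae", _STEMS),
--     ("family", "idae", ["vir", "satellit", "viriform"]),
--     ("subfamily", "inae", _STEMS),
-- ]
--
-- _GENUS = ["virus", "viriform", "viroid", "satellite"]
--
--
-- def get_level_lineage(name: str) -> str:
--     """Get level lineage from name (stem+ending grammar)."""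
--     if name.endswith("Viruses"):
--         return "root"
--     for rank, end, stems in _RANKS:
--         if name.endswith(end):
--             head = name[: len(name) - len(end)]
--             if any(head.endswith(s) for s in stems):
--                 return rank
--     for g in _GENUS:
--         if name.endswith(g):
--             return "genus"
--     return None
-- ===== Notes on version B (the rewrite author's own statement) =====
-- stated objective: alternative
-- what changed: Replaces the 53-way level-by-level endswith scan with a stem+ending grammar: every table suffix (apart from the root literal and the four genus forms) is one of four stems plus a rank-specific ending, so B tests one ending per rank and then one stem against the remaining prefix; the family row's duplicated kingdom-form suffix (unreachable in A, since the kingdom row precedes it) is not listed under family.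
import Mathlib
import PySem

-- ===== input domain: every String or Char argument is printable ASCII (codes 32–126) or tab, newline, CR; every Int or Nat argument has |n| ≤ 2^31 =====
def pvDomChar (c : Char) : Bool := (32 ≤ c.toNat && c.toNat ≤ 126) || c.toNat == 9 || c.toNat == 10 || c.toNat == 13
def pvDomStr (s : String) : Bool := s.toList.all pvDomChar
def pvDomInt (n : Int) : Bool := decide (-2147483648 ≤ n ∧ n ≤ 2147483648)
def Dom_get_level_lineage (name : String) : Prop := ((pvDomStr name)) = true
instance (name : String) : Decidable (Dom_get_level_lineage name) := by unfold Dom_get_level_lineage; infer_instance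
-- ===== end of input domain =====

-- B replaces A's 53-way endswith scan with a stem+ending grammar: one ending per rank is
-- tested, then one of four stems against the remaining prefix (objective: alternative).

-- ===== PORT A =====
-- The taxonomic-suffix table of A.
def levelKey : List (String × List String) := [
    ("root", ["Viruses"]),
    ("realm", ["viria", "satellitia", "viroidia", "viriformia"]),
    ("subrealm", ["vira", "satellita", "viroida", "viriforma"]),
    ("kingdom", ["virae", "satellitae", "viroidae", "viriformae"]),
    ("subkingdom", ["virites", "satellitites", "viroidites", "viriformites"]),
    ("phylum", ["viricota", "satelliticota", "viroidicota", "viriformicota"]),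
    ("subphylum", ["viricotina", "satelliticotina", "viroidicotina", "viriformicotina"]),
    ("class", ["viricetes", "satelliticetes", "viroidicetes", "viriformicetes"]),
    ("subclass", ["viricetidae", "satelliticetidae", "viroidicetidae", "viriformicetidae"]),
    ("order", ["virales", "satellitales", "viroidales", "viriformales"]),
    ("suborder", ["virineae", "satellitineae", "viroidineae", "viriformineae"]),
    ("family", ["viridae", "viriformidae", "viroidae", "satellitidae"]),
    ("subfamily", ["virinae", "satellitinae", "viroidinae", "viriforminae"]),
    ("genus", ["virus", "viriform", "viroid", "satellite"])]

def get_level_lineage (name : String) : Option String :=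
  levelKey.findSome? (fun p =>
    p.2.findSome? (fun ext => if PySem.Str.endswith name ext then some p.1 else none))

-- ===== PORT B =====
-- _STEMS
def stemsB : List String := ["vir", "satellit", "viroid", "viriform"]

-- _RANKS: (rank, ending, admissible stems); "family" lacks the regular viroid form.
def ranksB : List (String × String × List String) := [
    ("realm", "ia", stemsB),
    ("subrealm", "a", stemsB),
    ("kingdom", "ae", stemsB),
    ("subkingdom", "ites", stemsB),
    ("phylum", "icota", stemsB),
    ("subphylum", "icotina", stemsB),
    ("class", "icetes", stemsB),
    ("subclass", "icetidae", stemsB),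
    ("order", "ales", stemsB),
    ("suborder", "ineae", stemsB),
    ("family", "idae", ["vir", "satellit", "viriform"]),
    ("subfamily", "inae", stemsB)]

-- _GENUS
def genusB : List String := ["virus", "viriform", "viroid", "satellite"]

-- Two sequential early-return loops; the second runs only if the first found nothing,
-- which is exactly Option.or of the two scans. name[: len(name) - len(end)] is the slice.
def get_level_lineage_alt (name : String) : Option String :=
  if PySem.Str.endswith name "Viruses" then some "root"
  else
    (ranksB.findSome? (fun t =>
      if PySem.Str.endswith name t.2.1 then
        (if t.2.2.any (fun s => PySem.Str.endswith
            (PySem.Str.slice name none (some (PySem.Str.len name - PySem.Str.len t.2.1))) s)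
          then some t.1 else none)
      else none)).or
    (genusB.findSome? (fun g => if PySem.Str.endswith name g then some "genus" else none))

-- ===== PRECONDITION & SPEC =====
def Spec_get_level_lineage (name : String) (out : Option String) : Prop := out = get_level_lineage_alt name
instance (name : String) (out : Option String) : Decidable (Spec_get_level_lineage name out) := by unfold Spec_get_level_lineage; infer_instance

-- ===== CLAIM (what is proved, stated in full; the proofs are below) =====
def Claim_equal_get_level_lineage : Prop := ∀ (name : String), Dom_get_level_lineage name → Spec_get_level_lineage name (get_level_lineage name)

-- ===== LEMMAS AND PROOFS =====

-- A's per-level scan, named so the chain stays readable.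
def brA (name lvl : String) (exts : List String) : Option String :=
  exts.findSome? (fun ext => if PySem.Str.endswith name ext then some lvl else none)

lemma fs_cons {α β : Type} (f : α → Option β) (x : α) (xs : List α) :
    (x :: xs).findSome? f = (f x).or (xs.findSome? f) := by
  cases h : f x <;> simp [h]

lemma ends_mono (name s t : String) (hst : s.toList <:+ t.toList)
    (h : PySem.Str.endswith name t = true) : PySem.Str.endswith name s = true := by
  rw [PySem.Str.endswith_eq, PySem.Chars.endswith_iff] at h ⊢
  exact hst.trans h

lemma suffix_append_cancel {α : Type} (a b c : List α) : a ++ c <:+ b ++ c ↔ a <:+ b := by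
  constructor
  · rintro ⟨t, ht⟩
    rw [← List.append_assoc] at ht
    exact ⟨t, List.append_cancel_right ht⟩
  · rintro ⟨t, ht⟩
    exact ⟨t, by rw [← List.append_assoc, ht]⟩

-- name.endswith(s + e)  ⟺  name.endswith(e) and name[:len(name)-len(e)].endswith(s)
lemma ends_comp (name s e : String) :
    PySem.Str.endswith name (s ++ e) =
      (PySem.Str.endswith name e &&
        PySem.Str.endswith
          (PySem.Str.slice name none (some (PySem.Str.len name - PySem.Str.len e))) s) := by
  cases hE : PySem.Str.endswith name e with
  | false =>
    simp only [Bool.false_and]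
    cases hSE : PySem.Str.endswith name (s ++ e) with
    | false => rfl
    | true =>
      exfalso
      have h1 : e.toList <:+ (s ++ e).toList := by
        rw [String.toList_append]; exact List.suffix_append _ _
      rw [ends_mono name e (s ++ e) h1 hSE] at hE
      cases hE
  | true =>
    simp only [Bool.true_and]
    have hsuf : e.toList <:+ name.toList := by
      rw [PySem.Str.endswith_eq, PySem.Chars.endswith_iff] at hE; exact hE
    obtain ⟨m, hm⟩ := hsuf
    have hb : PySem.Str.len name - PySem.Str.len e = (m.length : Int) := by
      have : name.toList.length = m.length + e.toList.length := by
        rw [← hm, List.length_append]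
      simp [PySem.Str.len_eq, this]
    have hslice :
        (PySem.Str.slice name none (some (PySem.Str.len name - PySem.Str.len e))).toList = m := by
      rw [PySem.Str.toList_slice, PySem.Chars.slice_eq_listSlice, hb,
        PySem.List.slice_to _ (Int.natCast_nonneg _)]
      rw [Int.toNat_natCast, ← hm, List.take_left]
    rw [PySem.Str.endswith_eq, PySem.Str.endswith_eq, hslice]
    rw [Bool.eq_iff_iff, PySem.Chars.endswith_iff, PySem.Chars.endswith_iff]
    rw [String.toList_append, ← hm]
    exact suffix_append_cancel _ _ _

lemma brA_any (name lvl : String) (exts : List String) :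
    brA name lvl exts = if exts.any (fun e => PySem.Str.endswith name e) then some lvl else none := by
  induction exts with
  | nil => rfl
  | cons x xs ih =>
    rw [show brA name lvl (x :: xs)
        = ((if PySem.Str.endswith name x then some lvl else none).or (brA name lvl xs)) from
      fs_cons _ _ _, ih, List.any_cons]
    cases h : PySem.Str.endswith name x <;> simp [Option.or]

-- A's scan of a composed level = B's ending test + stem test.
lemma comp_level (name lvl e : String) (ss : List String) :
    brA name lvl (ss.map (fun s => s ++ e)) =
      if PySem.Str.endswith name e then
        (if ss.any (fun s => PySem.Str.endswith
            (PySem.Str.slice name none (some (PySem.Str.len name - PySem.Str.len e))) s)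
          then some lvl else none)
      else none := by
  rw [brA_any, List.any_map]
  have hany : ss.any ((fun x => PySem.Str.endswith name x) ∘ (fun s => s ++ e))
      = (PySem.Str.endswith name e && ss.any (fun s => PySem.Str.endswith
          (PySem.Str.slice name none (some (PySem.Str.len name - PySem.Str.len e))) s)) := by
    induction ss with
    | nil => simp
    | cons x xs ih =>
      simp only [List.any_cons, Function.comp, ends_comp, ih, Bool.and_or_distrib_left]
  rw [hany]
  cases hE : PySem.Str.endswith name e <;> simp

-- ===== VERDICT (by name: the statement is the Claim_ definition above) =====
-- decomposing A's ext lists as stem-map lists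
lemma exts_realm : (["viria", "satellitia", "viroidia", "viriformia"] : List String)
    = ["vir", "satellit", "viroid", "viriform"].map (fun s => s ++ "ia") := by decide
lemma exts_subrealm : (["vira", "satellita", "viroida", "viriforma"] : List String)
    = ["vir", "satellit", "viroid", "viriform"].map (fun s => s ++ "a") := by decide
lemma exts_kingdom : (["virae", "satellitae", "viroidae", "viriformae"] : List String)
    = ["vir", "satellit", "viroid", "viriform"].map (fun s => s ++ "ae") := by decide
lemma exts_subkingdom : (["virites", "satellitites", "viroidites", "viriformites"] : List String)
    = ["vir", "satellit", "viroid", "viriform"].map (fun s => s ++ "ites") := by decide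
lemma exts_phylum : (["viricota", "satelliticota", "viroidicota", "viriformicota"] : List String)
    = ["vir", "satellit", "viroid", "viriform"].map (fun s => s ++ "icota") := by decide
lemma exts_subphylum : (["viricotina", "satelliticotina", "viroidicotina", "viriformicotina"] : List String)
    = ["vir", "satellit", "viroid", "viriform"].map (fun s => s ++ "icotina") := by decide
lemma exts_class : (["viricetes", "satelliticetes", "viroidicetes", "viriformicetes"] : List String)
    = ["vir", "satellit", "viroid", "viriform"].map (fun s => s ++ "icetes") := by decide
lemma exts_subclass : (["viricetidae", "satelliticetidae", "viroidicetidae", "viriformicetidae"] : List String)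
    = ["vir", "satellit", "viroid", "viriform"].map (fun s => s ++ "icetidae") := by decide
lemma exts_order : (["virales", "satellitales", "viroidales", "viriformales"] : List String)
    = ["vir", "satellit", "viroid", "viriform"].map (fun s => s ++ "ales") := by decide
lemma exts_suborder : (["virineae", "satellitineae", "viroidineae", "viriformineae"] : List String)
    = ["vir", "satellit", "viroid", "viriform"].map (fun s => s ++ "ineae") := by decide
lemma exts_subfamily : (["virinae", "satellitinae", "viroidinae", "viriforminae"] : List String)
    = ["vir", "satellit", "viroid", "viriform"].map (fun s => s ++ "inae") := by decide

-- when name does not end in "viroidae", A's family row scans the regular three forms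
lemma fam_drop (name : String) (hVd : PySem.Str.endswith name "viroidae" = false) :
    brA name "family" ["viridae", "viriformidae", "viroidae", "satellitidae"]
      = brA name "family" (["vir", "satellit", "viriform"].map (fun s => s ++ "idae")) := by
  rw [brA_any, brA_any]
  have hc : (["viridae", "viriformidae", "viroidae", "satellitidae"].any
        (fun e => PySem.Str.endswith name e))
      = ((["vir", "satellit", "viriform"].map (fun s => s ++ "idae")).any
        (fun e => PySem.Str.endswith name e)) := by
    rw [show (["vir", "satellit", "viriform"].map (fun s => s ++ "idae") : List String)
        = ["viridae", "satellitidae", "viriformidae"] from by decide]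
    simp only [List.any_cons, List.any_nil, hVd, Bool.false_or, Bool.or_false]
    cases PySem.Str.endswith name "viridae" <;>
      cases PySem.Str.endswith name "viriformidae" <;>
        cases PySem.Str.endswith name "satellitidae" <;> rfl
  rw [hc]

theorem get_level_lineage_spec : Claim_equal_get_level_lineage := by
  intro name _
  unfold Spec_get_level_lineage
  have hA : get_level_lineage name = levelKey.findSome? (fun p => brA name p.1 p.2) := rfl
  have hG : brA name "genus" ["virus", "viriform", "viroid", "satellite"]
      = genusB.findSome? (fun g => if PySem.Str.endswith name g then some "genus" else none) := rfl
  rw [hA]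
  unfold get_level_lineage_alt
  by_cases hV : PySem.Str.endswith name "Viruses" = true
  · rw [if_pos hV]
    have hroot : brA name "root" ["Viruses"] = some "root" := by
      rw [brA_any]; simp only [List.any_cons, List.any_nil, Bool.or_false, hV, if_true]
    simp only [levelKey, fs_cons, List.findSome?_nil, hroot, Option.some_or]
  · have hV' : PySem.Str.endswith name "Viruses" = false := by
      cases h : PySem.Str.endswith name "Viruses"
      · rfl
      · exact absurd h hV
    rw [if_neg hV]
    have hroot : brA name "root" ["Viruses"] = none := by
      rw [brA_any]; simp only [List.any_cons, List.any_nil, Bool.or_false, hV']; rfl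
    by_cases hVd : PySem.Str.endswith name "viroidae" = true
    · -- name ends in "viroidae": both sides stop at "kingdom"
      have hKA : brA name "kingdom" ["virae", "satellitae", "viroidae", "viriformae"]
          = some "kingdom" := by
        rw [brA_any]
        simp only [List.any_cons, List.any_nil, hVd, Bool.true_or, Bool.or_true, if_true]
      have hae : PySem.Str.endswith name "ae" = true :=
        ends_mono name "ae" "viroidae" (by decide) hVd
      have hstem : PySem.Str.endswith
          (PySem.Str.slice name none (some (PySem.Str.len name - PySem.Str.len "ae")))
          "viroid" = true := by
        have hcomp := ends_comp name "viroid" "ae"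
        rw [show ("viroid" ++ "ae" : String) = "viroidae" from by decide, hVd, hae,
          Bool.true_and] at hcomp
        exact hcomp.symm
      have hKB : (if PySem.Str.endswith name "ae" then
            (if (["vir", "satellit", "viroid", "viriform"] : List String).any
                (fun s => PySem.Str.endswith
                  (PySem.Str.slice name none
                    (some (PySem.Str.len name - PySem.Str.len "ae"))) s)
              then some "kingdom" else none)
          else none) = some "kingdom" := by
        rw [if_pos hae, if_pos (by
          simp only [List.any_cons, List.any_nil, hstem, Bool.true_or, Bool.or_true])]
      simp only [levelKey, ranksB, stemsB, fs_cons, List.findSome?_nil, hroot, hKA,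
        exts_realm, exts_subrealm, comp_level, hKB, Option.none_or, Option.some_or,
        Option.or_assoc, Option.or_none]
    · have hVd' : PySem.Str.endswith name "viroidae" = false := by
        cases h : PySem.Str.endswith name "viroidae"
        · rfl
        · exact absurd h hVd
      simp only [levelKey, ranksB, stemsB, fs_cons, List.findSome?_nil, hroot,
        fam_drop name hVd', hG,
        exts_realm, exts_subrealm, exts_kingdom, exts_subkingdom, exts_phylum,
        exts_subphylum, exts_class, exts_subclass, exts_order, exts_suborder,
        exts_subfamily, comp_level,
        Option.none_or, Option.or_assoc, Option.or_none]
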